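-- pv_equiv track=rewrite | github.com/meincove/COVE | cove-ai-core/app/core/fit.py | _normalize_sizes
-- ===== SOURCE A (Python) =====
-- from typing import Optional, List, Dict, Literal
--
-- SizeName = Literal["XS", "S", "M", "L", "XL", "XXL"]
--
-- _SUPPORTED_SIZES: List[SizeName] = ["XS", "S", "M", "L", "XL", "XXL"]
--
-- def _normalize_sizes(sizes: Optional[List[str]]) -> List[SizeName]:
--     """
--     Normalize incoming size labels:
--     - Uppercase
--     - Filter to supported
--     - Deduplicate
--     - Order by standard XS..XXL
--     """
--     if not sizes:
--         return []
--
--     seen = set()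
--     normalized: List[SizeName] = []
--
--     for s in sizes:
--         if not s:
--             continue
--         su = s.strip().upper()
--         if su in _SUPPORTED_SIZES and su not in seen:
--             seen.add(su)
--             normalized.append(su)  # type: ignore[arg-type]
--
--     # order according to _SUPPORTED_SIZES
--     order_index = {name: i for i, name in enumerate(_SUPPORTED_SIZES)}
--     normalized.sort(key=lambda x: order_index[x])
--     return normalized
-- ===== SOURCE B (Python) =====
-- from typing import Optional, List, Dict, Literal
--
-- SizeName = Literal["XS", "S", "M", "L", "XL", "XXL"]
--
-- _SUPPORTED_SIZES: List[SizeName] = ["XS", "S", "M", "L", "XL", "XXL"]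
--
-- def _normalize_sizes(sizes: Optional[List[str]]) -> List[SizeName]:
--     if not sizes:
--         return []
--     present = {s.strip().upper() for s in sizes if s}
--     return [name for name in _SUPPORTED_SIZES if name in present]
-- ===== Notes on version B (the rewrite author's own statement) =====
-- stated objective: simpler
-- what changed: B collects the normalized labels into one set and emits them by iterating the fixed canonical order, eliminating A's seen-set/accumulator loop, the order_index dict and the sort.
import Mathlib
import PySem

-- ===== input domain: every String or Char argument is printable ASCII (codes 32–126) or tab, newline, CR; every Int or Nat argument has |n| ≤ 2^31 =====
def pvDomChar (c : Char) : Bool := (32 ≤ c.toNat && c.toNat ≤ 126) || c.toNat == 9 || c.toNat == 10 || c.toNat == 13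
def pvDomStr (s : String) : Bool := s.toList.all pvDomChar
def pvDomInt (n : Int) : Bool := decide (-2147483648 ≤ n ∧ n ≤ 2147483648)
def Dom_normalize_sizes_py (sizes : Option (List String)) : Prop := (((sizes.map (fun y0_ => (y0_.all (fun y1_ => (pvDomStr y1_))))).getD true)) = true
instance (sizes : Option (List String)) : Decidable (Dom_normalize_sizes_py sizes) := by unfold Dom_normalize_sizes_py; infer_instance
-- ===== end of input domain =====

-- B replaces A's accumulate-then-sort (seen set, order_index dict, sort) by collecting a set of
-- normalized labels and emitting them in the fixed canonical order: simpler decomposition.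


-- ===== PORT A =====
def pvSupported : List String := ["XS", "S", "M", "L", "XL", "XXL"]

-- s.strip().upper()
def pvNorm (s : String) : String := PySem.Str.upper (PySem.Str.strip s)

-- loop body: 'if not s: continue; su = …; if su in _SUPPORTED_SIZES and su not in seen: …'
def pvStepA (st : PySem.Set String × List String) (s : String) : PySem.Set String × List String :=
  if s = "" then st
  else
    let su := pvNorm s
    if su ∈ pvSupported ∧ su ∉ st.1 then (PySem.Set.add st.1 su, st.2 ++ [su]) else st

def normalize_sizes_py (sizes : Option (List String)) : List String :=
  match sizes with
  | none => []
  | some l =>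
    if l = [] then []
    else
      let st := l.foldl pvStepA (PySem.Set.ofList [], [])
      -- order_index = {name: i for i, name in enumerate(_SUPPORTED_SIZES)}
      let orderIndex : PySem.Dict String Int :=
        PySem.Dict.ofList ((PySem.List.enumerate pvSupported).map (fun p => (p.2, p.1)))
      -- normalized.sort(key=lambda x: order_index[x]); order_index[x] never misses (every
      -- element of normalized is in _SUPPORTED_SIZES), so getD's default 0 is never used
      PySem.List.sorted st.2 (fun x => PySem.Dict.getD orderIndex x 0) false

-- ===== PORT B =====
def normalize_sizes_py_alt (sizes : Option (List String)) : List String :=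
  match sizes with
  | none => []
  | some l =>
    if l = [] then []
    else
      -- present = {s.strip().upper() for s in sizes if s}
      let present := PySem.Set.ofList ((l.filter (fun s => s ≠ "")).map pvNorm)
      pvSupported.filter (fun name => name ∈ present)

-- ===== PRECONDITION & SPEC =====
def Spec_normalize_sizes_py (sizes : Option (List String)) (out : List String) : Prop := out = normalize_sizes_py_alt sizes
instance (sizes : Option (List String)) (out : List String) : Decidable (Spec_normalize_sizes_py sizes out) := by unfold Spec_normalize_sizes_py; infer_instance

-- ===== CLAIM (what is proved, stated in full; the proofs are below) =====
def Claim_equal_normalize_sizes_py : Prop := ∀ (sizes : Option (List String)), Dom_normalize_sizes_py sizes → Spec_normalize_sizes_py sizes (normalize_sizes_py sizes)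

-- ===== LEMMAS AND PROOFS =====

-- fold invariant: the accumulator stays nodup, mirrors the seen set, and its members are
-- exactly the initial members plus the supported normalizations of nonempty inputs seen so far
theorem pvFoldA_inv (l : List String) (st : PySem.Set String × List String)
    (hdup : st.2.Nodup) (hmir : ∀ x, x ∈ st.1 ↔ x ∈ st.2) :
    (l.foldl pvStepA st).2.Nodup ∧
    (∀ x, x ∈ (l.foldl pvStepA st).2 ↔
      x ∈ st.2 ∨ (x ∈ pvSupported ∧ ∃ s ∈ l, s ≠ "" ∧ pvNorm s = x)) := by
  induction l generalizing st with
  | nil => exact ⟨hdup, fun x => by simp⟩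
  | cons s l ih =>
    simp only [List.foldl_cons]
    by_cases hs : s = ""
    · have := ih st hdup hmir
      simp only [pvStepA, if_pos hs]
      refine ⟨this.1, fun x => ?_⟩
      rw [this.2 x]
      constructor
      · rintro (h | h) <;> [exact Or.inl h; exact Or.inr ⟨h.1, h.2.imp fun t ht => ⟨List.mem_cons_of_mem _ ht.1, ht.2⟩⟩]
      · rintro (h | ⟨hx, t, ht, hne, heq⟩)
        · exact Or.inl h
        · rcases List.mem_cons.mp ht with rfl | ht
          · exact absurd hs hne
          · exact Or.inr ⟨hx, t, ht, hne, heq⟩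
    · by_cases hc : pvNorm s ∈ pvSupported ∧ pvNorm s ∉ st.1
      · have hst' : (pvStepA st s) = (PySem.Set.add st.1 (pvNorm s), st.2 ++ [pvNorm s]) := by
          simp [pvStepA, hs, hc]
        rw [hst']
        have hnotmem : pvNorm s ∉ st.2 := fun h => hc.2 ((hmir _).mpr h)
        have hdup' : (st.2 ++ [pvNorm s]).Nodup := by
          rw [List.nodup_append]
          refine ⟨hdup, List.nodup_singleton _, ?_⟩
          intro a ha b hb
          simp only [List.mem_cons, List.not_mem_nil, or_false] at hb
          subst hb
          exact fun h => hnotmem (h ▸ ha)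
        have hmir' : ∀ x, x ∈ PySem.Set.add st.1 (pvNorm s) ↔ x ∈ st.2 ++ [pvNorm s] := by
          intro x
          rw [PySem.Set.mem_add]
          simp [hmir x, or_comm]
        have := ih (PySem.Set.add st.1 (pvNorm s), st.2 ++ [pvNorm s]) hdup' hmir'
        refine ⟨this.1, fun x => ?_⟩
        rw [this.2 x]
        simp only [List.mem_append, List.mem_cons, List.not_mem_nil, or_false]
        constructor
        · rintro ((h | rfl) | ⟨hx, t, ht, hne, heq⟩)
          · exact Or.inl h
          · exact Or.inr ⟨hc.1, s, Or.inl rfl, hs, rfl⟩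
          · exact Or.inr ⟨hx, t, Or.inr ht, hne, heq⟩
        · rintro (h | ⟨hx, t, (rfl | ht), hne, heq⟩)
          · exact Or.inl (Or.inl h)
          · exact Or.inl (Or.inr heq.symm)
          · exact Or.inr ⟨hx, t, ht, hne, heq⟩
      · have hst' : (pvStepA st s) = st := by simp [pvStepA, hs, hc]
        rw [hst']
        have := ih st hdup hmir
        refine ⟨this.1, fun x => ?_⟩
        rw [this.2 x]
        constructor
        · rintro (h | ⟨hx, t, ht, hne, heq⟩)
          · exact Or.inl h
          · exact Or.inr ⟨hx, t, List.mem_cons_of_mem _ ht, hne, heq⟩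
        · rintro (h | ⟨hx, t, ht, hne, heq⟩)
          · exact Or.inl h
          · rcases List.mem_cons.mp ht with rfl | ht
            · -- s contributes: pvNorm s ∈ supported; since ¬hc, pvNorm s ∈ st.1 = st.2
              subst heq
              rcases not_and_or.mp hc with h1 | h1
              · exact absurd hx h1
              · exact Or.inl ((hmir _).mp (not_not.mp h1))
            · exact Or.inr ⟨hx, t, ht, hne, heq⟩

-- membership in B's 'present' set
theorem pv_mem_present (l : List String) (x : String) :
    x ∈ PySem.Set.ofList ((l.filter (fun s => s ≠ "")).map pvNorm) ↔
      ∃ s ∈ l, s ≠ "" ∧ pvNorm s = x := by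
  rw [PySem.Set.mem_ofList]
  simp only [List.mem_map, List.mem_filter]
  constructor
  · rintro ⟨s, ⟨hsl, hne⟩, rfl⟩
    exact ⟨s, hsl, by simpa using hne, rfl⟩
  · rintro ⟨s, hsl, hne, rfl⟩
    exact ⟨s, ⟨hsl, by simpa using hne⟩, rfl⟩

-- ===== VERDICT (by name: the statement is the Claim_ definition above) =====
theorem normalize_sizes_py_spec : Claim_equal_normalize_sizes_py := by
  intro sizes _
  unfold Spec_normalize_sizes_py normalize_sizes_py normalize_sizes_py_alt
  match sizes with
  | none => rfl
  | some l =>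
    by_cases hl : l = []
    · simp [hl]
    · simp only [if_neg hl]
      set key : String → Int :=
        fun x => PySem.Dict.getD (PySem.Dict.ofList ((PySem.List.enumerate pvSupported).map (fun p => (p.2, p.1)))) x 0 with hkey
      set acc := (l.foldl pvStepA (PySem.Set.ofList [], [])).2 with hacc
      set B := pvSupported.filter
        (fun name => name ∈ PySem.Set.ofList ((l.filter (fun s => s ≠ "")).map pvNorm)) with hB
      have hinv := pvFoldA_inv l (PySem.Set.ofList [], []) (by simp) (by simp [PySem.Set.ofList])
      have hmemacc : ∀ x, x ∈ acc ↔ x ∈ pvSupported ∧ ∃ s ∈ l, s ≠ "" ∧ pvNorm s = x := by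
        intro x; rw [← hacc] at hinv; rw [hinv.2 x]; simp
      have hmemB : ∀ x, x ∈ B ↔ x ∈ pvSupported ∧ ∃ s ∈ l, s ≠ "" ∧ pvNorm s = x := by
        intro x
        rw [hB, List.mem_filter]
        simp only [decide_eq_true_eq, pv_mem_present]
      have hperm : B.Perm acc := by
        rw [List.perm_ext_iff_of_nodup ((by decide : pvSupported.Nodup).filter _) hinv.1]
        intro x; rw [hmemB x, hmemacc x]
      have hpw : B.Pairwise (fun a b => key a < key b) := by
        have hsup : pvSupported.Pairwise (fun a b => key a < key b) := by
          rw [hkey]; decide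
        exact hsup.filter _
      exact PySem.List.sorted_eq_of_perm_of_pairwise_lt acc B key hperm hpw
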